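-- pv_equiv track=rewrite | github.com/leksval/canrun | src/ml_pipeline_datascience.py | _estimate_engine_type
-- ===== SOURCE A (Python) =====
-- def _estimate_engine_type(game_name: str) -> str:
--     """Estimate game engine type"""
--     name_lower = game_name.lower()
--     if 'unreal' in name_lower or any(word in name_lower for word in ['fortnite', 'rocket_league']):
--         return 'unreal'
--     elif any(word in name_lower for word in ['battlefield', 'apex']):
--         return 'source'
--     elif 'cyberpunk' in name_lower:
--         return 'red_engine'
--     else:
--         return 'unknown'
-- ===== SOURCE B (Python) =====
-- ENGINE_KEYWORDS = {
--     'unreal': 0, 'fortnite': 0, 'rocket_league': 0,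
--     'battlefield': 1, 'apex': 1,
--     'cyberpunk': 2,
-- }
-- LABELS = {0: 'unreal', 1: 'source', 2: 'red_engine'}
--
-- def _estimate_engine_type(game_name: str) -> str:
--     name_lower = game_name.lower()
--     hits = [p for k, p in ENGINE_KEYWORDS.items() if k in name_lower]
--     return LABELS[min(hits)] if hits else 'unknown'
-- ===== Notes on version B (the rewrite author's own statement) =====
-- stated objective: alternative
-- what changed: Instead of a short-circuiting if/elif cascade, B collects the priorities of ALL matching keywords in one filtering pass over a flat keyword-to-priority map, then returns the label of the minimum matched priority (or 'unknown' if none matched).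
import Mathlib
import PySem

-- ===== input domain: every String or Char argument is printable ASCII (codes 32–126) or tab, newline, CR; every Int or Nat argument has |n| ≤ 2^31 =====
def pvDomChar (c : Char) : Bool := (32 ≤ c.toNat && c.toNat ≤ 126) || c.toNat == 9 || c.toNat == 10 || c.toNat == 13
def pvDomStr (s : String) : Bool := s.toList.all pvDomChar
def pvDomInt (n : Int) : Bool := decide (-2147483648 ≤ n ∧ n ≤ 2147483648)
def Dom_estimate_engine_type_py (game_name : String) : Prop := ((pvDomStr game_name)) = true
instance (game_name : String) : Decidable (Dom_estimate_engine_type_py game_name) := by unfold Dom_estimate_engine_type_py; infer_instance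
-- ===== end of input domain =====

-- B replaces the short-circuiting if/elif cascade by one filtering pass that collects the priorities of all matching keywords and returns the label of the minimum matched priority (alternative decomposition, same cost).


-- ===== PORT A =====
def estimate_engine_type_py (game_name : String) : String :=
  let name_lower := PySem.Str.lower game_name
  if PySem.Str.isIn "unreal" name_lower
      || ["fortnite", "rocket_league"].any (fun word => PySem.Str.isIn word name_lower) then
    "unreal"
  else if ["battlefield", "apex"].any (fun word => PySem.Str.isIn word name_lower) then
    "source"
  else if PySem.Str.isIn "cyberpunk" name_lower then
    "red_engine"
  else
    "unknown"

-- ===== PORT B =====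
def pvEngineKeywords : List (String × Int) :=
  [("unreal", 0), ("fortnite", 0), ("rocket_league", 0),
   ("battlefield", 1), ("apex", 1),
   ("cyberpunk", 2)]

def pvLabels : List (Int × String) := [(0, "unreal"), (1, "source"), (2, "red_engine")]

def estimate_engine_type_py_alt (game_name : String) : String :=
  let name_lower := PySem.Str.lower game_name
  let hits := (pvEngineKeywords.filter (fun kp => PySem.Str.isIn kp.1 name_lower)).map Prod.snd
  match PySem.List.min? hits (fun p => p) with
  | none => "unknown"
  | some m =>
      -- LABELS[m]: key m is always present when hits ≠ []; none branch is unreachable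
      match PySem.Dict.get? (PySem.Dict.mk pvLabels) m with
      | some l => l
      | none => "unknown"

-- ===== PRECONDITION & SPEC =====
def Spec_estimate_engine_type_py (game_name : String) (out : String) : Prop := out = estimate_engine_type_py_alt game_name
instance (game_name : String) (out : String) : Decidable (Spec_estimate_engine_type_py game_name out) := by unfold Spec_estimate_engine_type_py; infer_instance

-- ===== CLAIM =====
def Claim_equal_estimate_engine_type_py : Prop := ∀ (game_name : String), Dom_estimate_engine_type_py game_name → Spec_estimate_engine_type_py game_name (estimate_engine_type_py game_name)

-- ===== LEMMAS AND PROOFS =====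

-- ===== VERDICT =====
-- proof helpers: the six substring tests abstracted to Booleans
def pvHit (u f r bt a c : Bool) (k : String) : Bool :=
  if k == "unreal" then u else if k == "fortnite" then f else if k == "rocket_league" then r
  else if k == "battlefield" then bt else if k == "apex" then a else c

theorem pvKey (u f r bt a c : Bool) :
    (if u || (f || (r || false)) then "unreal"
     else if bt || (a || false) then "source"
     else if c then "red_engine" else "unknown")
  = (match PySem.List.min? ((pvEngineKeywords.filter (fun kp => pvHit u f r bt a c kp.1)).map Prod.snd) (fun p => p) with
     | none => "unknown"
     | some m =>
        match PySem.Dict.get? (PySem.Dict.mk pvLabels) m with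
        | some l => l
        | none => "unknown") := by
  cases u <;> cases f <;> cases r <;> cases bt <;> cases a <;> cases c <;> rfl


theorem estimate_engine_type_py_spec : Claim_equal_estimate_engine_type_py := by
  intro game_name _
  unfold Spec_estimate_engine_type_py estimate_engine_type_py estimate_engine_type_py_alt
  dsimp only
  have hfil : pvEngineKeywords.filter
        (fun kp => PySem.Str.isIn kp.1 (PySem.Str.lower game_name))
      = pvEngineKeywords.filter
        (fun kp => pvHit (PySem.Str.isIn "unreal" (PySem.Str.lower game_name))
            (PySem.Str.isIn "fortnite" (PySem.Str.lower game_name))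
            (PySem.Str.isIn "rocket_league" (PySem.Str.lower game_name))
            (PySem.Str.isIn "battlefield" (PySem.Str.lower game_name))
            (PySem.Str.isIn "apex" (PySem.Str.lower game_name))
            (PySem.Str.isIn "cyberpunk" (PySem.Str.lower game_name)) kp.1) := by
    apply List.filter_congr
    intro x hx
    fin_cases hx <;> rfl
  rw [hfil]
  exact pvKey _ _ _ _ _ _
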